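-- pv_equiv track=rewrite | github.com/GTimothee/repartition_experiments | repartition_experiments/algorithms/policy_remake.py | get_pos_association_dict
-- ===== SOURCE A (Python) =====
-- def get_pos_association_dict(volumestokeep, outfiles_partititon):
--     """ Converts 3d index to numeric index
--     """
--     index = 0
--     _3d_to_numeric_pos_dict = dict()
--     for i in range(outfiles_partititon[0]):
--         for j in range(outfiles_partititon[1]):
--             for k in range(outfiles_partititon[2]):
--                 _3d_to_numeric_pos_dict[(i,j,k)] = index
--                 index += 1
--     return _3d_to_numeric_pos_dict
-- ===== SOURCE B (Python) =====
-- def get_pos_association_dict(volumestokeep, outfiles_partititon):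
--     """Converts 3d index to numeric index by one flat loop over the numeric
--     positions, decoding each number back into its 3d coordinates with divmod."""
--     p0, p1, p2 = outfiles_partititon[0], outfiles_partititon[1], outfiles_partititon[2]
--     if p0 <= 0 or p1 <= 0 or p2 <= 0:
--         return {}
--     d = {}
--     for n in range(p0 * p1 * p2):
--         i, r = divmod(n, p1 * p2)
--         j, k = divmod(r, p2)
--         d[(i, j, k)] = n
--     return d
-- ===== Notes on version B (the rewrite author's own statement) =====
-- stated objective: alternative
-- what changed: Replaces A's three nested coordinate loops with a running counter by one flat loop over the numeric positions 0..p0*p1*p2-1, decoding each number back into its (i,j,k) coordinates with divmod (the inverse mapping), with an early empty return when any dimension is nonpositive.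
import Mathlib
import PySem

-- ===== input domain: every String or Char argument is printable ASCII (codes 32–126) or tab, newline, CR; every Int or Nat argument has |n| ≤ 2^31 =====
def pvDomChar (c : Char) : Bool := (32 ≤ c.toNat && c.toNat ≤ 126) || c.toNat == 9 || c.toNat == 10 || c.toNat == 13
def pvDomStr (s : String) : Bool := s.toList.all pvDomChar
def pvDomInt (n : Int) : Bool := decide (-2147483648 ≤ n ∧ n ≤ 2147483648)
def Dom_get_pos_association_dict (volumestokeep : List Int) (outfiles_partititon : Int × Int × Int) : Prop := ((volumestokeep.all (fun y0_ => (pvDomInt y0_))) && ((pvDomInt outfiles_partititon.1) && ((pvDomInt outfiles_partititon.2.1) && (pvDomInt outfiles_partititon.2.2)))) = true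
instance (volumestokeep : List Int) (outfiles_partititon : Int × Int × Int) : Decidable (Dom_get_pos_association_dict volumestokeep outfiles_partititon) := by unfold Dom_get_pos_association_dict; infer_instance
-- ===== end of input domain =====

-- B replaces A's three nested coordinate loops with a running counter by ONE flat loop
-- over the numeric positions, decoding each number into its (i,j,k) with divmod
-- (objective: alternative — the inverse mapping direction, same asymptotic cost).

-- ===== PORT A =====
-- literal transliteration of A: three nested loops carrying (dict, index), then the dict
def get_pos_association_dict (volumestokeep : List Int) (outfiles_partititon : Int × Int × Int) : List (Int × Int × Int × Int) :=
  let st : PySem.Dict (Int × Int × Int) Int × Int :=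
    (PySem.List.pyRange 0 outfiles_partititon.1 1).foldl (fun st i =>
      (PySem.List.pyRange 0 outfiles_partititon.2.1 1).foldl (fun st j =>
        (PySem.List.pyRange 0 outfiles_partititon.2.2 1).foldl (fun st k =>
          (st.1.insert (i, j, k) st.2, st.2 + 1)) st) st) (PySem.Dict.empty, 0)
  st.1.items.map (fun q => (q.1.1, q.1.2.1, q.1.2.2, q.2))

-- ===== PORT B =====
-- literal transliteration of B: early empty return, then one flat loop over the numeric
-- positions, decoding each n with divmod (ported as floordiv/mod; divisors are positive here)
def get_pos_association_dict_alt (volumestokeep : List Int) (outfiles_partititon : Int × Int × Int) : List (Int × Int × Int × Int) :=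
  let p0 := outfiles_partititon.1
  let p1 := outfiles_partititon.2.1
  let p2 := outfiles_partititon.2.2
  if p0 ≤ 0 ∨ p1 ≤ 0 ∨ p2 ≤ 0 then []
  else
    let d : PySem.Dict (Int × Int × Int) Int :=
      (PySem.List.pyRange 0 (p0 * p1 * p2) 1).foldl (fun d n =>
        let i := PySem.Int.floordiv n (p1 * p2)
        let r := PySem.Int.mod n (p1 * p2)
        let j := PySem.Int.floordiv r p2
        let k := PySem.Int.mod r p2
        d.insert (i, j, k) n) PySem.Dict.empty
    d.items.map (fun q => (q.1.1, q.1.2.1, q.1.2.2, q.2))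

-- ===== PRECONDITION & SPEC =====
def Spec_get_pos_association_dict (volumestokeep : List Int) (outfiles_partititon : Int × Int × Int) (out : List (Int × Int × Int × Int)) : Prop := out = get_pos_association_dict_alt volumestokeep outfiles_partititon
instance (volumestokeep : List Int) (outfiles_partititon : Int × Int × Int) (out : List (Int × Int × Int × Int)) : Decidable (Spec_get_pos_association_dict volumestokeep outfiles_partititon out) := by unfold Spec_get_pos_association_dict; infer_instance

-- ===== CLAIM (what is proved, stated in full; the proofs are below) =====
def Claim_equal_get_pos_association_dict : Prop := ∀ (volumestokeep : List Int) (outfiles_partititon : Int × Int × Int), Dom_get_pos_association_dict volumestokeep outfiles_partititon → Spec_get_pos_association_dict volumestokeep outfiles_partititon (get_pos_association_dict volumestokeep outfiles_partititon)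

-- ===== LEMMAS AND PROOFS =====

-- the common closed-form list both ports are reduced to
def pvF (a b c : Int) : List (Int × Int × Int × Int) :=
  (PySem.List.pyRange 0 a 1).flatMap (fun i =>
    (PySem.List.pyRange 0 b 1).flatMap (fun j =>
      (PySem.List.pyRange 0 c 1).map (fun k => (i, j, k, (i * b + j) * c + k))))

-- the loop body of A, as a step function over its (dict, index) state
def pvStep (st : PySem.Dict (Int × Int × Int) Int × Int) (x : Int × Int × Int) : PySem.Dict (Int × Int × Int) Int × Int :=
  (st.1.insert x st.2, st.2 + 1)

-- the list of keys A's nested loops visit, in order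
def pvKeys (a b c : Int) : List (Int × Int × Int) :=
  (PySem.List.pyRange 0 a 1).flatMap (fun i =>
    (PySem.List.pyRange 0 b 1).flatMap (fun j =>
      (PySem.List.pyRange 0 c 1).map (fun k => (i, j, k))))

theorem pvEnum_cons {α : Type} (x : α) (l : List α) (s : Int) :
    PySem.List.enumerate (x :: l) s = (s, x) :: PySem.List.enumerate l (s + 1) := by
  simp [PySem.List.enumerate]

-- A's counter loop over fresh distinct keys appends the enumerated key list
theorem pvFoldl_step (l : List (Int × Int × Int)) :
    ∀ (d : PySem.Dict (Int × Int × Int) Int) (n : Int),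
      (∀ x ∈ l, d.contains x = false) → l.Nodup →
      (l.foldl pvStep (d, n)).1.items
        = d.items ++ (PySem.List.enumerate l n).map (fun q => (q.2, q.1)) := by
  induction l with
  | nil => intro d n _ _; simp [PySem.List.enumerate]
  | cons x t ih =>
    intro d n hfresh hnd
    have hx : d.contains x = false := hfresh x (by simp)
    have hfresh' : ∀ y ∈ t, (d.insert x n).contains y = false := by
      intro y hy
      have hyx : y ≠ x := by
        intro h; exact (List.nodup_cons.mp hnd).1 (h ▸ hy)
      simp [PySem.Dict.contains_insert, hyx, hfresh y (by simp [hy])]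
    have := ih (d.insert x n) (n + 1) hfresh' (List.nodup_cons.mp hnd).2
    simp only [List.foldl_cons, pvStep] at this ⊢
    rw [this, PySem.Dict.items_insert_of_not_contains d n hx, pvEnum_cons]
    simp

-- B's decoding loop over a list producing distinct keys appends the decoded pairs
theorem pvFoldl_ins (dec : Int → Int × Int × Int) (l : List Int) :
    ∀ (d : PySem.Dict (Int × Int × Int) Int),
      (∀ x ∈ l, d.contains (dec x) = false) → (l.map dec).Nodup →
      (l.foldl (fun d n => d.insert (dec n) n) d).items
        = d.items ++ l.map (fun n => (dec n, n)) := by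
  induction l with
  | nil => intro d _ _; simp
  | cons x t ih =>
    intro d hfresh hnd
    have hx : d.contains (dec x) = false := hfresh x (by simp)
    have hnd2 : (dec x :: t.map dec).Nodup := by simpa only [List.map_cons] using hnd
    have hnd' : (t.map dec).Nodup := (List.nodup_cons.mp hnd2).2
    have hfresh' : ∀ y ∈ t, (d.insert (dec x) x).contains (dec y) = false := by
      intro y hy
      have hyx : dec y ≠ dec x := by
        intro h
        exact (List.nodup_cons.mp hnd2).1 (by rw [← h]; exact List.mem_map_of_mem hy)
      simp [PySem.Dict.contains_insert, hyx, hfresh y (by simp [hy])]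
    have := ih (d.insert (dec x) x) hfresh' hnd'
    simp only [List.foldl_cons] at this ⊢
    rw [this, PySem.Dict.items_insert_of_not_contains d x hx]
    simp

theorem pvEnum_range : ∀ (m : Nat) (s : Int),
    PySem.List.enumerate (List.range m) s = (List.range m).map (fun k : Nat => (s + (k:Int), k)) := by
  intro m
  induction m with
  | zero => intro s; simp
  | succ m ih =>
    intro s
    rw [List.range_succ, PySem.List.enumerate_append, ih]
    simp [PySem.List.enumerate]

theorem pvEnum_map {α β : Type} (f : α → β) : ∀ (l : List α) (s : Int),
    PySem.List.enumerate (l.map f) s = (PySem.List.enumerate l s).map (fun q => (q.1, f q.2)) := by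
  intro l
  induction l with
  | nil => intro s; simp
  | cons x t ih => intro s; simp [ih]

-- inner loop: enumeration of the k-row starting at s
theorem pvEnum_inner (c : Int) (i j s : Int) :
    (PySem.List.enumerate ((PySem.List.pyRange 0 c 1).map (fun k => (i, j, k))) s).map
        (fun q => (q.2.1, q.2.2.1, q.2.2.2, q.1))
      = (PySem.List.pyRange 0 c 1).map (fun k => (i, j, k, s + k)) := by
  rw [PySem.List.pyRange_one, List.map_map, pvEnum_map, pvEnum_range]
  simp [Function.comp_def]

theorem pvLen_row (c : Int) (i j : Int) :
    ((PySem.List.pyRange 0 c 1).map (fun k => (i, j, k))).length = c.toNat := by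
  simp [PySem.List.length_pyRange_one]

theorem pvEnum_mid_nat (c i : Int) : ∀ (m : Nat) (s : Int),
    (PySem.List.enumerate (((List.range m).map (fun j : Nat => (j : Int))).flatMap
        (fun j => (PySem.List.pyRange 0 c 1).map (fun k => (i, j, k)))) s).map
        (fun q => (q.2.1, q.2.2.1, q.2.2.2, q.1))
      = ((List.range m).map (fun j : Nat => (j : Int))).flatMap
          (fun j => (PySem.List.pyRange 0 c 1).map (fun k => (i, j, k, s + j * c + k))) := by
  intro m
  induction m with
  | zero => intro s; simp
  | succ m ih =>
    intro s
    rw [List.range_succ, List.map_append, List.flatMap_append, PySem.List.enumerate_append,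
      List.map_append, ih, List.flatMap_append]
    congr 1
    have hplen : (((List.range m).map (fun j : Nat => (j : Int))).flatMap
        (fun j => (PySem.List.pyRange 0 c 1).map (fun k => (i, j, k)))).length = m * c.toNat := by
      rw [List.length_flatMap, List.map_map]
      have hf : ((fun j : Int => ((PySem.List.pyRange 0 c 1).map (fun k => (i, j, k))).length)
          ∘ fun j : Nat => (j : Int)) = fun _ : Nat => c.toNat :=
        funext fun j => pvLen_row c i j
      rw [hf]
      simp [List.map_const', List.sum_replicate]
    rw [hplen]
    simp only [List.map_singleton, List.flatMap_singleton]
    rw [pvEnum_inner]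
    by_cases hc : 0 < c
    · apply List.map_congr_left
      intro k _
      have : (c.toNat : Int) = c := Int.toNat_of_nonneg hc.le
      simp only [Prod.mk.injEq, true_and]
      push_cast [this]
      ring
    · rw [PySem.List.pyRange_one_eq_nil (by omega)]
      simp

theorem pvEnum_mid (b c : Int) (i s : Int) :
    (PySem.List.enumerate ((PySem.List.pyRange 0 b 1).flatMap
        (fun j => (PySem.List.pyRange 0 c 1).map (fun k => (i, j, k)))) s).map
        (fun q => (q.2.1, q.2.2.1, q.2.2.2, q.1))
      = (PySem.List.pyRange 0 b 1).flatMap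
          (fun j => (PySem.List.pyRange 0 c 1).map (fun k => (i, j, k, s + j * c + k))) := by
  have h0 : PySem.List.pyRange 0 b 1 = (List.range (b - 0).toNat).map (fun j : Nat => (j : Int)) := by
    rw [PySem.List.pyRange_one]; simp
  rw [h0]
  exact pvEnum_mid_nat c i (b - 0).toNat s

theorem pvKeys_nodup (a b c : Int) : (pvKeys a b c).Nodup := by
  unfold pvKeys
  rw [List.nodup_flatMap]
  constructor
  · intro i _
    rw [List.nodup_flatMap]
    constructor
    · intro j _
      exact (PySem.List.nodup_pyRange_one 0 c).map (fun k k' h => by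
        simpa using congrArg (fun t : Int × Int × Int => t.2.2) h)
    · refine List.Pairwise.imp ?_ (PySem.List.pairwise_lt_pyRange_one 0 b)
      intro j j' hjj t ht ht'
      simp only [List.mem_map] at ht ht'
      obtain ⟨k, _, rfl⟩ := ht
      obtain ⟨k', _, h⟩ := ht'
      exact absurd (congrArg (fun t : Int × Int × Int => t.2.1) h).symm (by simp; omega)
  · refine List.Pairwise.imp ?_ (PySem.List.pairwise_lt_pyRange_one 0 a)
    intro i i' hii t ht ht'
    simp only [List.mem_flatMap, List.mem_map] at ht ht'
    obtain ⟨j, _, k, _, rfl⟩ := ht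
    obtain ⟨j', _, k', _, h⟩ := ht'
    exact absurd (congrArg (fun t : Int × Int × Int => t.1) h).symm (by simp; omega)

theorem pvLen_slab (b c i : Int) :
    ((PySem.List.pyRange 0 b 1).flatMap
        (fun j => (PySem.List.pyRange 0 c 1).map (fun k => (i, j, k)))).length
      = b.toNat * c.toNat := by
  rw [List.length_flatMap]
  have hf : (fun j : Int => ((PySem.List.pyRange 0 c 1).map (fun k => (i, j, k))).length)
      = fun _ : Int => c.toNat := funext fun j => pvLen_row c i j
  rw [hf]
  simp [List.map_const', List.sum_replicate, PySem.List.length_pyRange_one]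

theorem pvEnum_keys (a b c : Int) :
    (PySem.List.enumerate (pvKeys a b c) 0).map (fun q => (q.2.1, q.2.2.1, q.2.2.2, q.1))
      = pvF a b c := by
  have key : ∀ (m : Nat),
      (PySem.List.enumerate (((List.range m).map (fun n : Nat => (n : Int))).flatMap
          (fun i => (PySem.List.pyRange 0 b 1).flatMap
            (fun j => (PySem.List.pyRange 0 c 1).map (fun k => (i, j, k)))) ) 0).map
          (fun q => (q.2.1, q.2.2.1, q.2.2.2, q.1))
        = ((List.range m).map (fun n : Nat => (n : Int))).flatMap (fun i =>
            (PySem.List.pyRange 0 b 1).flatMap (fun j =>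
              (PySem.List.pyRange 0 c 1).map (fun k => (i, j, k, (i * b + j) * c + k)))) := by
    intro m
    induction m with
    | zero => simp
    | succ m ih =>
      rw [List.range_succ, List.map_append, List.flatMap_append, PySem.List.enumerate_append,
        List.map_append, ih, List.flatMap_append]
      congr 1
      have hplen : (((List.range m).map (fun n : Nat => (n : Int))).flatMap
          (fun i => (PySem.List.pyRange 0 b 1).flatMap
            (fun j => (PySem.List.pyRange 0 c 1).map (fun k => (i, j, k))))).length
          = m * (b.toNat * c.toNat) := by
        rw [List.length_flatMap, List.map_map]
        have hf : ((fun i : Int => ((PySem.List.pyRange 0 b 1).flatMap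
            (fun j => (PySem.List.pyRange 0 c 1).map (fun k => (i, j, k)))).length)
            ∘ fun n : Nat => (n : Int)) = fun _ : Nat => b.toNat * c.toNat :=
          funext fun n => pvLen_slab b c n
        rw [hf]
        simp [List.map_const', List.sum_replicate]
      rw [hplen]
      simp only [List.map_singleton, List.flatMap_singleton]
      rw [pvEnum_mid]
      by_cases hbc : 0 < b ∧ 0 < c
      · obtain ⟨hb, hc⟩ := hbc
        apply List.flatMap_congr
        intro j _
        apply List.map_congr_left
        intro k _
        have h1 : (b.toNat : Int) = b := Int.toNat_of_nonneg hb.le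
        have h2 : (c.toNat : Int) = c := Int.toNat_of_nonneg hc.le
        simp only [Prod.mk.injEq, true_and]
        push_cast [h1, h2]
        ring
      · rcases not_and_or.mp hbc with h | h
        · rw [PySem.List.pyRange_one_eq_nil (show b ≤ 0 by omega)]; simp
        · have : PySem.List.pyRange 0 c 1 = [] := PySem.List.pyRange_one_eq_nil (by omega)
          simp [this]
  have h0 : PySem.List.pyRange 0 a 1 = (List.range (a - 0).toNat).map (fun n : Nat => (n : Int)) := by
    rw [PySem.List.pyRange_one]; simp
  unfold pvKeys pvF
  rw [h0]
  exact key (a - 0).toNat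

-- A's port always computes the closed-form list
set_option maxRecDepth 4096 in
theorem pvA_eq_F (v : List Int) (a b c : Int) :
    get_pos_association_dict v (a, b, c) = pvF a b c := by
  unfold get_pos_association_dict
  simp only []
  have hA : ((PySem.List.pyRange 0 a 1).foldl (fun st i =>
      (PySem.List.pyRange 0 b 1).foldl (fun st j =>
        (PySem.List.pyRange 0 c 1).foldl (fun st k =>
          (st.1.insert (i, j, k) st.2, st.2 + 1)) st) st)
      ((PySem.Dict.empty : PySem.Dict (Int × Int × Int) Int), (0 : Int)))
      = (pvKeys a b c).foldl pvStep (PySem.Dict.empty, 0) := by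
    simp [pvKeys, List.foldl_flatMap, List.foldl_map, pvStep]
  rw [hA, pvFoldl_step _ _ _ (by intro x _; simp [PySem.Dict.contains_empty]) (pvKeys_nodup a b c)]
  simp only [show (PySem.Dict.empty : PySem.Dict (Int × Int × Int) Int).items = [] from rfl, List.nil_append, List.map_map]
  rw [show ((fun q : (Int × Int × Int) × Int => (q.1.1, q.1.2.1, q.1.2.2, q.2)) ∘
        (fun q : Int × (Int × Int × Int) => (q.2, q.1)))
      = (fun q : Int × (Int × Int × Int) => (q.2.1, q.2.2.1, q.2.2.2, q.1)) from rfl]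
  exact pvEnum_keys a b c

-- B's decoder
def pvDec (b c : Int) (n : Int) : Int × Int × Int :=
  (PySem.Int.floordiv n (b * c), PySem.Int.floordiv (PySem.Int.mod n (b * c)) c,
   PySem.Int.mod (PySem.Int.mod n (b * c)) c)

-- Nat form of the range-product decomposition
theorem pvRangeMul (A B : Nat) :
    List.range (A * B) = (List.range A).flatMap (fun i => (List.range B).map (fun j => i * B + j)) := by
  induction A with
  | zero => simp
  | succ A ih =>
    rw [Nat.succ_mul, List.range_add, ih, List.range_succ, List.flatMap_append]
    simp

-- decoding the flat numeric range yields the closed-form list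
set_option maxRecDepth 8192 in
theorem pvB_list_eq_F (a b c : Int) (ha : 0 < a) (hb : 0 < b) (hc : 0 < c) :
    (PySem.List.pyRange 0 (a * b * c) 1).map
        (fun n => ((pvDec b c n).1, (pvDec b c n).2.1, (pvDec b c n).2.2, n))
      = pvF a b c := by
  obtain ⟨A, hA⟩ : ∃ A : Nat, (A : Int) = a := ⟨a.toNat, Int.toNat_of_nonneg ha.le⟩
  obtain ⟨B, hB⟩ : ∃ B : Nat, (B : Int) = b := ⟨b.toNat, Int.toNat_of_nonneg hb.le⟩
  obtain ⟨C, hC⟩ : ∃ C : Nat, (C : Int) = c := ⟨c.toNat, Int.toNat_of_nonneg hc.le⟩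
  subst hA hB hC
  have hr : ∀ x : Int, PySem.List.pyRange 0 x 1 = (List.range x.toNat).map (fun n : Nat => (n : Int)) := by
    intro x; rw [PySem.List.pyRange_one]; simp
  have habc : ((A : Int) * B * C).toNat = A * B * C := by
    rw [show ((A : Int) * B * C) = ((A * B * C : Nat) : Int) by push_cast; ring]
    exact Int.toNat_natCast _
  unfold pvF
  rw [hr]
  rw [hr]
  rw [hr]
  rw [hr]
  rw [habc]
  rw [Nat.mul_assoc]
  rw [pvRangeMul A (B * C)]
  simp only [List.map_flatMap, List.flatMap_map, List.map_map]
  apply List.flatMap_congr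
  intro i hi
  rw [pvRangeMul B C]
  simp only [List.map_flatMap, List.flatMap_map, List.map_map]
  apply List.flatMap_congr
  intro j hj
  apply List.map_congr_left
  intro k hk
  have hjB : j < B := List.mem_range.mp hj
  have hkC : k < C := List.mem_range.mp hk
  have hCpos : 0 < C := by exact_mod_cast hc
  have hBpos : 0 < B := by exact_mod_cast hb
  have hBCpos : 0 < B * C := Nat.mul_pos hBpos hCpos
  have hlt : j * C + k < B * C := by
    calc j * C + k < j * C + C := by omega
    _ = (j + 1) * C := by ring
    _ ≤ B * C := Nat.mul_le_mul_right C (by omega)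
  have hn : i * (B * C) + (j * C + k) = (j * C + k) + i * (B * C) := by ring
  have hdiv : (i * (B * C) + (j * C + k)) / (B * C) = i := by
    rw [hn, Nat.add_mul_div_right _ _ hBCpos, Nat.div_eq_of_lt hlt]; omega
  have hmod : (i * (B * C) + (j * C + k)) % (B * C) = j * C + k := by
    rw [hn, Nat.add_mul_mod_self_right, Nat.mod_eq_of_lt hlt]
  have hdiv2 : (j * C + k) / C = j := by
    rw [Nat.add_comm, Nat.add_mul_div_right _ _ hCpos, Nat.div_eq_of_lt hkC]; omega
  have hmod2 : (j * C + k) % C = k := by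
    rw [Nat.add_comm, Nat.add_mul_mod_self_right, Nat.mod_eq_of_lt hkC]
  simp only [Function.comp_def, pvDec]
  have hbc : (B : Int) * C = ((B * C : Nat) : Int) := by push_cast; ring
  have hcast : ((i * (B * C) + (j * C + k) : Nat) : Int)
      = (i : Int) * ((B * C : Nat) : Int) + ((j * C + k : Nat) : Int) := by push_cast; ring
  rw [hbc]
  have e1 : PySem.Int.floordiv ((i * (B * C) + (j * C + k) : Nat) : Int) ((B * C : Nat) : Int)
      = ((i * (B * C) + (j * C + k)) / (B * C) : Nat) := PySem.Int.floordiv_natCast _ _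
  have e2 : PySem.Int.mod ((i * (B * C) + (j * C + k) : Nat) : Int) ((B * C : Nat) : Int)
      = (((i * (B * C) + (j * C + k)) % (B * C) : Nat) : Int) := PySem.Int.mod_natCast _ _
  have hn' : ((i * (B * C) + (j * C + k) : Nat) : Int)
      = ((i : Int) * B + j) * C + k := by push_cast; ring
  rw [e1, e2, hdiv, hmod]
  have e3 : PySem.Int.floordiv ((j * C + k : Nat) : Int) (C : Int)
      = ((j * C + k) / C : Nat) := PySem.Int.floordiv_natCast _ _
  have e4 : PySem.Int.mod ((j * C + k : Nat) : Int) (C : Int)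
      = (((j * C + k) % C : Nat) : Int) := PySem.Int.mod_natCast _ _
  rw [e3, e4, hdiv2, hmod2, hn']

theorem pvF_keys (a b c : Int) :
    (pvF a b c).map (fun q => (q.1, q.2.1, q.2.2.1)) = pvKeys a b c := by
  unfold pvF pvKeys
  simp [List.map_flatMap, List.map_map, Function.comp_def]

-- ===== VERDICT (by name: the statement is the Claim_ definition above) =====
theorem get_pos_association_dict_spec : Claim_equal_get_pos_association_dict := by
  intro v p _
  show _ = _
  obtain ⟨a, b, c⟩ := p
  rw [pvA_eq_F]
  unfold get_pos_association_dict_alt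
  simp only []
  by_cases h : a ≤ 0 ∨ b ≤ 0 ∨ c ≤ 0
  · rw [if_pos h]
    unfold pvF
    rcases h with h | h | h
    · rw [PySem.List.pyRange_one_eq_nil h]; simp
    · rw [PySem.List.pyRange_one_eq_nil h]; simp
    · have : PySem.List.pyRange 0 c 1 = [] := PySem.List.pyRange_one_eq_nil h
      simp [this]
  · rw [if_neg h]
    push_neg at h
    obtain ⟨ha, hb, hc⟩ := h
    have hlist := pvB_list_eq_F a b c ha hb hc
    have hfold : ((PySem.List.pyRange 0 (a * b * c) 1).foldl (fun d n =>
        d.insert (PySem.Int.floordiv n (b * c),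
          PySem.Int.floordiv (PySem.Int.mod n (b * c)) c,
          PySem.Int.mod (PySem.Int.mod n (b * c)) c) n)
        (PySem.Dict.empty : PySem.Dict (Int × Int × Int) Int))
        = (PySem.List.pyRange 0 (a * b * c) 1).foldl (fun d n => d.insert (pvDec b c n) n)
            PySem.Dict.empty := by
      simp [pvDec]
    have hkeysNodup : ((PySem.List.pyRange 0 (a * b * c) 1).map (pvDec b c)).Nodup := by
      have : (PySem.List.pyRange 0 (a * b * c) 1).map (pvDec b c)
          = pvKeys a b c := by
        rw [← pvF_keys a b c, ← hlist, List.map_map]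
        rfl
      rw [this]
      exact pvKeys_nodup a b c
    rw [hfold, pvFoldl_ins (pvDec b c) _ _ (by intro x _; simp [PySem.Dict.contains_empty]) hkeysNodup]
    simp only [show (PySem.Dict.empty : PySem.Dict (Int × Int × Int) Int).items = [] from rfl,
      List.nil_append, List.map_map]
    rw [← hlist]
    rfl
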